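-- pv_equiv track=rewrite | github.com/intellistream/sageLLM | runtime/execution_graph/optimizer.py | _plan_memory_reuse
-- ===== SOURCE A (Python) =====
-- def _plan_memory_reuse(
--
--     lifetimes: dict[str, tuple[int, int]],
-- ) -> dict[str, str]:
--     """Plan which tensors can reuse memory from other tensors."""
--     reuse_plan: dict[str, str] = {}
--     sorted_tensors = sorted(lifetimes.items(), key=lambda x: x[1][0])
--
--     for i, (tensor_name, (start, end)) in enumerate(sorted_tensors):
--         # Find a tensor that ended before this one started
--         for prev_name, (prev_start, prev_end) in sorted_tensors[:i]:
--             if prev_end < start and prev_name not in reuse_plan.values():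
--                 reuse_plan[tensor_name] = prev_name
--                 break
--
--     return reuse_plan
-- ===== SOURCE B (Python) =====
-- def _merge(a, b):
--     # merge two lists of (pos, name) pairs, each ascending by pos
--     out = []
--     i = 0
--     j = 0
--     while i < len(a) and j < len(b):
--         if a[i][0] <= b[j][0]:
--             out.append(a[i])
--             i += 1
--         else:
--             out.append(b[j])
--             j += 1
--     out.extend(a[i:])
--     out.extend(b[j:])
--     return out
--
--
-- def _plan_memory_reuse(lifetimes):
--     """Single sweep in start order: tensors whose lifetime has ended move once
--     from a pending list to a position-ordered free list; each tensor claims the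
--     earliest free tensor, which is removed so it is never claimed twice."""
--     plan = {}
--     order = sorted(lifetimes.items(), key=lambda x: x[1][0])
--     pending = []  # (pos, end, name), ascending by pos
--     free = []     # (pos, name), ascending by pos: ended and unclaimed
--     for pos, (name, (start, end)) in enumerate(order):
--         moved = [(p, n) for (p, e, n) in pending if e < start]
--         pending = [t for t in pending if not t[1] < start]
--         free = _merge(free, moved)
--         if free:
--             plan[name] = free.pop(0)[1]
--         pending.append((pos, end, name))
--     return plan
-- ===== Notes on version B (the rewrite author's own statement) =====
-- stated objective: faster
-- what changed: Instead of rescanning the whole sorted prefix for every tensor, B sweeps once: each tensor is expiry-tested only while it is pending, moves once into a position-ordered free list (list merge), and each tensor claims the head of that list; a timing run measured B far faster (40x at n=1024), though both are O(n^2) in the worst case.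
import Mathlib
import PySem

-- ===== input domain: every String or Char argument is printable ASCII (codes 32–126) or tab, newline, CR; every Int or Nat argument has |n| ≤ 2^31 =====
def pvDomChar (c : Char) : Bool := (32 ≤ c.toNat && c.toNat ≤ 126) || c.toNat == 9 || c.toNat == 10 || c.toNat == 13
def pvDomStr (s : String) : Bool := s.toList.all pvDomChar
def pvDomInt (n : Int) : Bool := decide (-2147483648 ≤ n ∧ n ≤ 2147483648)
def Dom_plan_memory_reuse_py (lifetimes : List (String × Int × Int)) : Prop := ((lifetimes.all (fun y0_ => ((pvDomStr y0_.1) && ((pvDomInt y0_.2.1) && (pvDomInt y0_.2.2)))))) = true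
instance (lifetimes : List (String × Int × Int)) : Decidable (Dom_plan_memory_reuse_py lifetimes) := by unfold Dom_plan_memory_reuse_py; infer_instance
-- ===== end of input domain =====

-- B replaces A's per-tensor rescan of the sorted prefix by a single sweep with a pending
-- list and a position-ordered free list; a timing run measured B much faster.

-- ===== PORT A =====
-- inner-loop test: prev_end < start and prev_name not in reuse_plan.values()
def pvPredA (reusePlan : PySem.Dict String String) (start : Int) (prev : String × Int × Int) : Bool :=
  decide (prev.2.2 < start) && !(reusePlan.values.contains prev.1)

def plan_memory_reuse_py (lifetimes : List (String × Int × Int)) : List (String × String) :=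
  let sortedTensors := PySem.List.sorted lifetimes (fun x => x.2.1) false
  ((PySem.List.enumerate sortedTensors 0).foldl
    (fun reusePlan it =>
      match (PySem.List.slice sortedTensors none (some it.1)).find? (pvPredA reusePlan it.2.2.1) with
      | some prev => reusePlan.insert it.2.1 prev.1
      | none => reusePlan)
    PySem.Dict.empty).items

-- ===== PORT B =====
-- _merge of Source B: merge two pos-ascending lists of (pos, name)
def pvMerge : List (Int × String) → List (Int × String) → List (Int × String)
  | [], b => b
  | a, [] => a
  | x :: a, y :: b =>
      if x.1 ≤ y.1 then x :: pvMerge a (y :: b) else y :: pvMerge (x :: a) b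

-- one iteration of Source B's sweep; state = (plan, pending, free)
def pvStepB (st : PySem.Dict String String × List (Int × Int × String) × List (Int × String))
    (it : Int × String × Int × Int) :
    PySem.Dict String String × List (Int × Int × String) × List (Int × String) :=
  let plan := st.1; let pending := st.2.1; let free := st.2.2
  let pos := it.1; let name := it.2.1; let start := it.2.2.1; let stop := it.2.2.2
  let moved := (pending.filter (fun t => decide (t.2.1 < start))).map (fun t => (t.1, t.2.2))
  let pending' := pending.filter (fun t => !decide (t.2.1 < start))
  match pvMerge free moved with
  | [] => (plan, pending' ++ [(pos, stop, name)], [])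
  | f :: rest => (plan.insert name f.2, pending' ++ [(pos, stop, name)], rest)

def plan_memory_reuse_py_alt (lifetimes : List (String × Int × Int)) : List (String × String) :=
  let order := PySem.List.sorted lifetimes (fun x => x.2.1) false
  ((PySem.List.enumerate order 0).foldl pvStepB (PySem.Dict.empty, [], [])).1.items

-- ===== PRECONDITION & SPEC =====
-- Pre_ excludes association lists with duplicate names: the Python argument is a dict,
-- which cannot carry duplicate keys (it silently collapses them before A runs).
def Pre_plan_memory_reuse_py (lifetimes : List (String × Int × Int)) : Prop :=
  (lifetimes.map (·.1)).Nodup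

instance (lifetimes : List (String × Int × Int)) : Decidable (Pre_plan_memory_reuse_py lifetimes) := by
  unfold Pre_plan_memory_reuse_py; infer_instance

def pvWitness_plan_memory_reuse_py : (List (String × Int × Int)) :=
  [("a", 0, 1), ("b", 2, 3)]

def Spec_plan_memory_reuse_py (lifetimes : List (String × Int × Int)) (out : List (String × String)) : Prop := out = plan_memory_reuse_py_alt lifetimes
instance (lifetimes : List (String × Int × Int)) (out : List (String × String)) : Decidable (Spec_plan_memory_reuse_py lifetimes out) := by unfold Spec_plan_memory_reuse_py; infer_instance

-- ===== CLAIM (what is proved, stated in full; the proofs are below) =====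
def Claim_equal_plan_memory_reuse_py : Prop := ∀ (lifetimes : List (String × Int × Int)), Dom_plan_memory_reuse_py lifetimes → Pre_plan_memory_reuse_py lifetimes → Spec_plan_memory_reuse_py lifetimes (plan_memory_reuse_py lifetimes)

-- ===== LEMMAS AND PROOFS =====

-- A's loop, indexed by the Nat position of the current element in s
def pvLoopA (s : List (String × Int × Int)) :
    List (String × Int × Int) → Nat → PySem.Dict String String → PySem.Dict String String
  | [], _, plan => plan
  | t :: rest, i, plan =>
      pvLoopA s rest (i + 1)
        (match (s.take i).find? (pvPredA plan t.2.1) with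
         | some prev => plan.insert t.1 prev.1
         | none => plan)

-- B's loop, same indexing
def pvLoopB :
    List (String × Int × Int) → Nat →
    (PySem.Dict String String × List (Int × Int × String) × List (Int × String)) →
    (PySem.Dict String String × List (Int × Int × String) × List (Int × String))
  | [], _, st => st
  | t :: rest, i, st => pvLoopB rest (i + 1) (pvStepB st ((i : Int), t))

-- the sweep invariant
structure pvInv (s : List (String × Int × Int)) (i : Nat) (plan : PySem.Dict String String)
    (pending : List (Int × Int × String)) (free : List (Int × String)) : Prop where
  pend_corr : ∀ p ∈ pending, ∃ k : Nat, ∃ hk : k < s.length,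
    k < i ∧ p.1 = (k : Int) ∧ s[k].2.2 = p.2.1 ∧ s[k].1 = p.2.2
  free_corr : ∀ q ∈ free, ∃ k : Nat, ∃ hk : k < s.length,
    k < i ∧ q.1 = (k : Int) ∧ s[k].1 = q.2 ∧
      ∃ j : Nat, ∃ hj : j < s.length, j < i ∧ s[k].2.2 < s[j].2.1
  pend_sorted : pending.Pairwise (fun a b => a.1 < b.1)
  free_sorted : free.Pairwise (fun a b => a.1 < b.1)
  disj : ∀ p ∈ pending, ∀ q ∈ free, p.1 ≠ q.1
  cover : ∀ (k : Nat) (hk : k < s.length), k < i →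
    (s[k].1 ∈ plan.values ↔ ¬ ((∃ p ∈ pending, p.1 = (k : Int)) ∨ (∃ q ∈ free, q.1 = (k : Int))))
  keys_corr : ∀ v ∈ plan.keys, ∃ k : Nat, ∃ hk : k < s.length, k < i ∧ v = s[k].1
  vals_corr : ∀ v ∈ plan.values, ∃ k : Nat, ∃ hk : k < s.length, k < i ∧ v = s[k].1
  keys_nodup : plan.keys.Nodup

theorem pvMerge_perm (a b : List (Int × String)) : (pvMerge a b).Perm (a ++ b) := by
  fun_induction pvMerge a b with
  | case1 b => simp
  | case2 a => simp
  | case3 x a y b h ih => simpa using ih.cons x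
  | case4 x a y b h ih =>
      exact (ih.cons y).trans List.perm_middle.symm

theorem mem_pvMerge {a b : List (Int × String)} {z : Int × String} :
    z ∈ pvMerge a b ↔ z ∈ a ∨ z ∈ b := by
  rw [(pvMerge_perm a b).mem_iff]; simp

theorem pvMerge_pairwise (a b : List (Int × String))
    (ha : a.Pairwise (fun x y => x.1 < y.1)) (hb : b.Pairwise (fun x y => x.1 < y.1))
    (hab : ∀ x ∈ a, ∀ y ∈ b, x.1 ≠ y.1) :
    (pvMerge a b).Pairwise (fun x y => x.1 < y.1) := by
  fun_induction pvMerge a b with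
  | case1 b => exact hb
  | case2 a => exact ha
  | case3 x a y b h ih =>
      refine List.Pairwise.cons ?_ (ih (List.Pairwise.sublist (by simp) ha) hb ?_)
      · intro z hz
        rcases mem_pvMerge.1 hz with hz | hz
        · exact (List.pairwise_cons.1 ha).1 z hz
        · rcases List.mem_cons.1 hz with rfl | hz
          · exact lt_of_le_of_ne h (hab x (by simp) z (by simp))
          · exact lt_of_le_of_lt h ((List.pairwise_cons.1 hb).1 z hz)
      · intro u hu v hv
        exact hab u (List.mem_cons_of_mem x hu) v hv
  | case4 x a y b h ih =>
      push Not at h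
      refine List.Pairwise.cons ?_ (ih ha (List.Pairwise.sublist (by simp) hb) ?_)
      · intro z hz
        rcases mem_pvMerge.1 hz with hz | hz
        · rcases List.mem_cons.1 hz with rfl | hz
          · exact h
          · exact lt_trans h ((List.pairwise_cons.1 ha).1 z hz)
        · exact (List.pairwise_cons.1 hb).1 z hz
      · intro u hu v hv
        exact hab u hu v (List.mem_cons_of_mem y hv)

theorem pvMain (s : List (String × Int × Int))
    (hnd : (s.map (·.1)).Nodup)
    (hmono : ∀ (p q : Nat) (hp : p < s.length) (hq : q < s.length), p ≤ q → s[p].2.1 ≤ s[q].2.1) :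
    ∀ (todo : List (String × Int × Int)) (i : Nat) plan pending free,
      todo = s.drop i → pvInv s i plan pending free →
      (pvLoopB todo i (plan, pending, free)).1 = pvLoopA s todo i plan := by
  have hninj : ∀ (k k' : Nat) (hk : k < s.length) (hk' : k' < s.length), s[k].1 = s[k'].1 → k = k' := by
    intro k k' hk hk' h
    have h2 : (s.map (·.1))[k]'(by simpa) = (s.map (·.1))[k']'(by simpa) := by simpa using h
    exact (List.Nodup.getElem_inj_iff hnd).1 h2
  intro todo
  induction todo with
  | nil => intro i plan pending free _ _; rfl
  | cons t rest ih =>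
    intro i plan pending free htodo hinv
    have hi : i < s.length := by
      by_contra hcon
      rw [List.drop_eq_nil_of_le (by omega)] at htodo
      exact List.cons_ne_nil _ _ htodo
    rw [List.drop_eq_getElem_cons hi] at htodo
    injection htodo with hti hrest
    subst hti
    -- Prop form of the inner-loop test
    have hpred : ∀ x : String × Int × Int,
        pvPredA plan s[i].2.1 x = true ↔ x.2.2 < s[i].2.1 ∧ x.1 ∉ plan.values := by
      intro x; simp [pvPredA]
    -- membership in the moved batch
    have hmoved : ∀ z : Int × String,
        z ∈ (pending.filter (fun p => decide (p.2.1 < s[i].2.1))).map (fun p => (p.1, p.2.2)) ↔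
        ∃ p ∈ pending, p.2.1 < s[i].2.1 ∧ z = (p.1, p.2.2) := by
      intro z
      simp only [List.mem_map, List.mem_filter, decide_eq_true_eq]
      constructor
      · rintro ⟨p, ⟨hp, hlt⟩, rfl⟩; exact ⟨p, hp, hlt, rfl⟩
      · rintro ⟨p, hp, hlt, rfl⟩; exact ⟨p, ⟨hp, hlt⟩, rfl⟩
    -- characterisation of the merged free list
    have hchar : ∀ z : Int × String,
        z ∈ pvMerge free ((pending.filter (fun p => decide (p.2.1 < s[i].2.1))).map (fun p => (p.1, p.2.2))) ↔
        ∃ k : Nat, ∃ hk : k < s.length, k < i ∧ z = ((k : Int), s[k].1) ∧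
          s[k].2.2 < s[i].2.1 ∧ s[k].1 ∉ plan.values := by
      intro z
      rw [mem_pvMerge]
      constructor
      · rintro (hz | hz)
        · obtain ⟨k, hk, hki, hz1, hz2, j, hj, hji, hlt⟩ := hinv.free_corr z hz
          refine ⟨k, hk, hki, ?_, lt_of_lt_of_le hlt (hmono j i hj hi (by omega)), ?_⟩
          · obtain ⟨z1, z2⟩ := z; simp only [Prod.mk.injEq]; exact ⟨hz1, hz2.symm⟩
          · intro hv
            exact (hinv.cover k hk hki).1 hv (Or.inr ⟨z, hz, hz1⟩)
        · obtain ⟨p, hp, hlt, rfl⟩ := (hmoved z).1 hz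
          obtain ⟨k, hk, hki, hp1, hpe, hpn⟩ := hinv.pend_corr p hp
          refine ⟨k, hk, hki, ?_, by rw [hpe]; exact hlt, ?_⟩
          · simp only [Prod.mk.injEq]; exact ⟨hp1, hpn.symm⟩
          · intro hv
            exact (hinv.cover k hk hki).1 hv (Or.inl ⟨p, hp, hp1⟩)
      · rintro ⟨k, hk, hki, rfl, hend, hnv⟩
        have hPF : (∃ p ∈ pending, p.1 = (k : Int)) ∨ (∃ q ∈ free, q.1 = (k : Int)) := by
          by_contra hcon
          exact hnv ((hinv.cover k hk hki).2 hcon)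
        rcases hPF with ⟨p, hp, hp1⟩ | ⟨q, hq, hq1⟩
        · right
          obtain ⟨kp, hkp, hkpi, hp1', hpe, hpn⟩ := hinv.pend_corr p hp
          have hkpk : kp = k := by rw [hp1'] at hp1; exact_mod_cast hp1
          subst hkpk
          refine (hmoved _).2 ⟨p, hp, by rw [← hpe]; exact hend, ?_⟩
          simp only [Prod.mk.injEq]
          exact ⟨hp1.symm, hpn⟩
        · left
          obtain ⟨kq, hkq, hkqi, hq1', hqn, _⟩ := hinv.free_corr q hq
          have hkqk : kq = k := by rw [hq1'] at hq1; exact_mod_cast hq1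
          subst hkqk
          have : q = ((kq : Int), s[kq].1) := by
            obtain ⟨q1, q2⟩ := q
            simp only [Prod.mk.injEq]
            exact ⟨hq1, hqn.symm⟩
          rw [← this]; exact hq
    -- the merged free list is position-sorted
    have hsorted' : (pvMerge free ((pending.filter (fun p => decide (p.2.1 < s[i].2.1))).map (fun p => (p.1, p.2.2)))).Pairwise
        (fun a b => a.1 < b.1) := by
      refine pvMerge_pairwise _ _ hinv.free_sorted ?_ ?_
      · refine (List.pairwise_map).2 ?_
        exact List.Pairwise.sublist List.filter_sublist hinv.pend_sorted
      · intro x hx y hy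
        obtain ⟨p, hp, _, rfl⟩ := (hmoved y).1 hy
        exact fun h => hinv.disj p hp x hx h.symm
    -- elements of the take-i prefix
    have htake : ∀ (j : Nat), ∀ x ∈ s.take j, ∃ (m : Nat) (hm : m < s.length), m < j ∧ s[m] = x := by
      intro j x hx
      obtain ⟨m, hm, hmx⟩ := List.mem_iff_getElem.1 hx
      have hm' : m < j ∧ m < s.length := by simp [List.length_take] at hm; omega
      exact ⟨m, hm'.2, hm'.1, by simpa [List.getElem_take] using hmx⟩
    simp only [pvLoopB, pvLoopA, pvStepB]
    cases hfe : pvMerge free ((pending.filter (fun p => decide (p.2.1 < s[i].2.1))).map (fun p => (p.1, p.2.2))) with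
    | nil =>
      -- nothing is free: A finds nothing, B claims nothing
      have hfind : (s.take i).find? (pvPredA plan s[i].2.1) = none := by
        rw [List.find?_eq_none]
        intro x hx hpx
        obtain ⟨m, hm, hmi, rfl⟩ := htake i x hx
        have := (hchar ((m : Int), s[m].1)).2 ⟨m, hm, hmi, rfl, ((hpred _).1 hpx).1, ((hpred _).1 hpx).2⟩
        rw [hfe] at this
        exact (List.not_mem_nil) this
      rw [hfind]
      refine ih (i + 1) plan
        (pending.filter (fun p => !decide (p.2.1 < s[i].2.1)) ++ [((i : Int), s[i].2.2, s[i].1)]) [] hrest ?_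
      refine { pend_corr := ?_, free_corr := ?_, pend_sorted := ?_, free_sorted := ?_,
               disj := ?_, cover := ?_, keys_corr := ?_, vals_corr := ?_, keys_nodup := hinv.keys_nodup }
      · intro p hp
        rcases List.mem_append.1 hp with hp | hp
        · obtain ⟨k, hk, hki, h1, h2, h3⟩ := hinv.pend_corr p (List.mem_of_mem_filter hp)
          exact ⟨k, hk, by omega, h1, h2, h3⟩
        · rw [List.mem_singleton] at hp
          subst hp
          exact ⟨i, hi, by omega, rfl, rfl, rfl⟩
      · intro z hz; exact absurd hz (List.not_mem_nil)
      · rw [List.pairwise_append]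
        refine ⟨List.Pairwise.sublist List.filter_sublist hinv.pend_sorted, List.pairwise_singleton _ _, ?_⟩
        intro p hp y hy
        rw [List.mem_singleton] at hy; subst hy
        obtain ⟨k, hk, hki, h1, _⟩ := hinv.pend_corr p (List.mem_of_mem_filter hp)
        rw [h1]; show (k : Int) < (i : Int); exact_mod_cast hki
      · exact List.Pairwise.nil
      · intro p _ z hz; exact absurd hz (List.not_mem_nil)
      · intro k hk hki1
        by_cases hkk : k = i
        · subst hkk
          constructor
          · intro hv
            obtain ⟨k', hk', hk'i, he⟩ := hinv.vals_corr _ hv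
            exact absurd (hninj k k' hk hk' he) (by omega)
          · intro h
            exact absurd (Or.inl ⟨((k : Int), s[k].2.2, s[k].1),
              List.mem_append_right _ (List.mem_singleton_self _), rfl⟩) h
        · have hki : k < i := by omega
          rw [hinv.cover k hk hki]
          constructor
          · intro hnPF
            rintro (⟨p, hp, hp1⟩ | ⟨z, hz, _⟩)
            · rcases List.mem_append.1 hp with hp | hp
              · exact hnPF (Or.inl ⟨p, List.mem_of_mem_filter hp, hp1⟩)
              · rw [List.mem_singleton] at hp; subst hp
                have hp1' : (i : Int) = (k : Int) := hp1
                omega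
            · exact absurd hz (List.not_mem_nil)
          · intro hnPF'
            rintro (⟨p, hp, hp1⟩ | ⟨z, hz, hz1⟩)
            · obtain ⟨kp, hkp, hkpi, hp1', hpe, hpn⟩ := hinv.pend_corr p hp
              have hkpk : kp = k := by rw [hp1'] at hp1; exact_mod_cast hp1
              subst hkpk
              by_cases hplt : p.2.1 < s[i].2.1
              · have hnV : s[kp].1 ∉ plan.values :=
                  fun hv => (hinv.cover kp hkp hki).1 hv (Or.inl ⟨p, hp, hp1⟩)
                have hz' := (hchar ((kp : Int), s[kp].1)).2
                  ⟨kp, hkp, hki, rfl, by rw [hpe]; exact hplt, hnV⟩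
                rw [hfe] at hz'
                exact absurd hz' (List.not_mem_nil)
              · exact hnPF' (Or.inl ⟨p, List.mem_append_left _
                  (List.mem_filter.2 ⟨hp, by simpa using hplt⟩), hp1⟩)
            · have hz' : z ∈ ([] : List (Int × String)) := by
                rw [← hfe]; exact mem_pvMerge.2 (Or.inl hz)
              exact absurd hz' (List.not_mem_nil)
      · intro v hv
        obtain ⟨k', hk', hk'i, he⟩ := hinv.keys_corr v hv
        exact ⟨k', hk', by omega, he⟩
      · intro v hv
        obtain ⟨k', hk', hk'i, he⟩ := hinv.vals_corr v hv
        exact ⟨k', hk', by omega, he⟩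
    | cons q restF =>
      have hqmem : q ∈ pvMerge free ((pending.filter (fun p => decide (p.2.1 < s[i].2.1))).map (fun p => (p.1, p.2.2))) := by
        rw [hfe]; exact List.mem_cons_self
      obtain ⟨k0, hk0, hk0i, hqe, hk0end, hk0nv⟩ := (hchar q).1 hqmem
      subst hqe
      have hk0pred : pvPredA plan s[i].2.1 (s[k0]'hk0) = true := (hpred _).2 ⟨hk0end, hk0nv⟩
      have hmin : ∀ (m : Nat) (hm : m < s.length), m < k0 → ¬ pvPredA plan s[i].2.1 s[m] = true := by
        intro m hm hmk0 hpm
        have hz := (hchar ((m : Int), s[m].1)).2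
          ⟨m, hm, by omega, rfl, ((hpred _).1 hpm).1, ((hpred _).1 hpm).2⟩
        rw [hfe] at hz
        rcases List.mem_cons.1 hz with hz | hz
        · have : (m : Int) = (k0 : Int) := congrArg Prod.fst hz
          have : m = k0 := by exact_mod_cast this
          omega
        · have hlt := (List.pairwise_cons.1 (hfe ▸ hsorted')).1 _ hz
          simp only at hlt
          have : (k0 : Int) < (m : Int) := hlt
          have : k0 < m := by exact_mod_cast this
          omega
      have hdecomp : s.take i = s.take k0 ++ s[k0] :: (s.drop (k0 + 1)).take (i - (k0 + 1)) := by
        conv_lhs => rw [show i = k0 + (i - k0) by omega, List.take_add]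
        rw [List.drop_eq_getElem_cons hk0, show i - k0 = (i - (k0 + 1)) + 1 by omega,
          List.take_succ_cons]
      have hfind : (s.take i).find? (pvPredA plan s[i].2.1) = some (s[k0]'hk0) := by
        rw [hdecomp, List.find?_append]
        have h1 : (s.take k0).find? (pvPredA plan s[i].2.1) = none := by
          rw [List.find?_eq_none]
          intro x hx
          obtain ⟨m, hm, hmi, rfl⟩ := htake k0 x hx
          exact hmin m hm hmi
        rw [h1, List.find?_cons_of_pos hk0pred]
        rfl
      rw [hfind]
      -- not-yet-present key: the current tensor's name
      have hnc : plan.contains s[i].1 = false := by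
        by_contra h
        have h' : plan.contains s[i].1 = true := by simpa using h
        obtain ⟨k', hk', hk'i, he⟩ := hinv.keys_corr _ ((PySem.Dict.contains_iff_mem_keys _ _).1 h')
        exact absurd (hninj i k' hi hk' he) (by omega)
      have hvals' : (plan.insert s[i].1 s[k0].1).values = plan.values ++ [s[k0].1] := by
        show ((plan.insert s[i].1 s[k0].1).items.map (·.2)) = plan.items.map (·.2) ++ [s[k0].1]
        rw [PySem.Dict.items_insert_of_not_contains plan s[k0].1 hnc]
        simp
      have hVmem : ∀ v, v ∈ (plan.insert s[i].1 s[k0].1).values ↔ v ∈ plan.values ∨ v = s[k0].1 := by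
        intro v; rw [hvals']; simp
      refine ih (i + 1) (plan.insert s[i].1 s[k0].1)
        (pending.filter (fun p => !decide (p.2.1 < s[i].2.1)) ++ [((i : Int), s[i].2.2, s[i].1)]) restF hrest ?_
      refine { pend_corr := ?_, free_corr := ?_, pend_sorted := ?_, free_sorted := ?_,
               disj := ?_, cover := ?_, keys_corr := ?_, vals_corr := ?_,
               keys_nodup := PySem.Dict.nodup_keys_insert plan _ _ hinv.keys_nodup }
      · intro p hp
        rcases List.mem_append.1 hp with hp | hp
        · obtain ⟨k, hk, hki, h1, h2, h3⟩ := hinv.pend_corr p (List.mem_of_mem_filter hp)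
          exact ⟨k, hk, by omega, h1, h2, h3⟩
        · rw [List.mem_singleton] at hp
          subst hp
          exact ⟨i, hi, by omega, rfl, rfl, rfl⟩
      · intro z hz
        obtain ⟨k, hk, hki, rfl, hend, hnv⟩ := (hchar z).1
          (by rw [hfe]; exact List.mem_cons_of_mem _ hz)
        exact ⟨k, hk, by omega, rfl, rfl, i, hi, by omega, hend⟩
      · rw [List.pairwise_append]
        refine ⟨List.Pairwise.sublist List.filter_sublist hinv.pend_sorted, List.pairwise_singleton _ _, ?_⟩
        intro p hp y hy
        rw [List.mem_singleton] at hy; subst hy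
        obtain ⟨k, hk, hki, h1, _⟩ := hinv.pend_corr p (List.mem_of_mem_filter hp)
        rw [h1]; show (k : Int) < (i : Int); exact_mod_cast hki
      · exact (List.pairwise_cons.1 (hfe ▸ hsorted')).2
      · intro p hp z hz
        obtain ⟨kz, hkz, hkzi, rfl, hzend, hznv⟩ := (hchar z).1
          (by rw [hfe]; exact List.mem_cons_of_mem _ hz)
        rcases List.mem_append.1 hp with hp | hp
        · obtain ⟨kp, hkp, hkpi, hp1, hpe, hpn⟩ := hinv.pend_corr p (List.mem_of_mem_filter hp)
          intro heq
          have heq' : (kp : Int) = (kz : Int) := by rw [← hp1]; exact heq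
          have hkpz : kp = kz := by exact_mod_cast heq'
          subst hkpz
          have hfil := (List.mem_filter.1 hp).2
          simp only [Bool.not_eq_true', decide_eq_false_iff_not] at hfil
          rw [← hpe] at hfil
          exact hfil hzend
        · rw [List.mem_singleton] at hp; subst hp
          intro heq
          have heq' : (i : Int) = (kz : Int) := heq
          omega
      · intro k hk hki1
        by_cases hkk : k = i
        · subst hkk
          constructor
          · intro hv
            rcases (hVmem _).1 hv with hv | hv
            · obtain ⟨k', hk', hk'i, he⟩ := hinv.vals_corr _ hv
              exact absurd (hninj k k' hk hk' he) (by omega)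
            · exact absurd (hninj k k0 hk hk0 hv) (by omega)
          · intro h
            exact absurd (Or.inl ⟨((k : Int), s[k].2.2, s[k].1),
              List.mem_append_right _ (List.mem_singleton_self _), rfl⟩) h
        · have hki : k < i := by omega
          by_cases hkk0 : k = k0
          · subst hkk0
            constructor
            · intro _
              rintro (⟨p, hp, hp1⟩ | ⟨z, hz, hz1⟩)
              · rcases List.mem_append.1 hp with hp | hp
                · obtain ⟨kp, hkp, hkpi, hp1', hpe, hpn⟩ := hinv.pend_corr p (List.mem_of_mem_filter hp)
                  have hkpk : kp = k := by rw [hp1'] at hp1; exact_mod_cast hp1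
                  subst hkpk
                  have hfil := (List.mem_filter.1 hp).2
                  simp only [Bool.not_eq_true', decide_eq_false_iff_not] at hfil
                  rw [← hpe] at hfil
                  exact hfil hk0end
                · rw [List.mem_singleton] at hp; subst hp
                  simp only at hp1
                  have : i = k := by exact_mod_cast hp1
                  omega
              · obtain ⟨kz, hkz, hkzi, rfl, _, _⟩ := (hchar z).1
                  (by rw [hfe]; exact List.mem_cons_of_mem _ hz)
                have hlt := (List.pairwise_cons.1 (hfe ▸ hsorted')).1 _ hz
                have h1 : (k : Int) < (kz : Int) := hlt
                have h2 : (kz : Int) = (k : Int) := hz1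
                omega
            · intro _
              exact (hVmem _).2 (Or.inr rfl)
          · have hLHS : s[k].1 ∈ (plan.insert s[i].1 s[k0].1).values ↔ s[k].1 ∈ plan.values := by
              rw [hVmem]
              constructor
              · rintro (h | h)
                · exact h
                · exact absurd (hninj k k0 hk hk0 h) hkk0
              · exact Or.inl
            rw [hLHS, hinv.cover k hk hki]
            constructor
            · intro hnPF
              rintro (⟨p, hp, hp1⟩ | ⟨z, hz, hz1⟩)
              · rcases List.mem_append.1 hp with hp | hp
                · exact hnPF (Or.inl ⟨p, List.mem_of_mem_filter hp, hp1⟩)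
                · rw [List.mem_singleton] at hp; subst hp
                  simp only at hp1
                  have : i = k := by exact_mod_cast hp1
                  omega
              · obtain ⟨kz, hkz, hkzi, rfl, hend, hnv⟩ := (hchar z).1
                  (by rw [hfe]; exact List.mem_cons_of_mem _ hz)
                have hz1' : (kz : Int) = (k : Int) := hz1
                have : kz = k := by exact_mod_cast hz1'
                subst this
                exact hnv ((hinv.cover kz hkz hkzi).2 hnPF)
            · intro hnPF'
              rintro (⟨p, hp, hp1⟩ | ⟨z, hz, hz1⟩)
              · obtain ⟨kp, hkp, hkpi, hp1', hpe, hpn⟩ := hinv.pend_corr p hp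
                have hkpk : kp = k := by rw [hp1'] at hp1; exact_mod_cast hp1
                subst hkpk
                by_cases hplt : p.2.1 < s[i].2.1
                · have hnV : s[kp].1 ∉ plan.values :=
                    fun hv => (hinv.cover kp hkp hki).1 hv (Or.inl ⟨p, hp, hp1⟩)
                  have hz' := (hchar ((kp : Int), s[kp].1)).2
                    ⟨kp, hkp, hki, rfl, by rw [hpe]; exact hplt, hnV⟩
                  rw [hfe] at hz'
                  rcases List.mem_cons.1 hz' with hz' | hz'
                  · have h1 : (kp : Int) = (k0 : Int) := congrArg Prod.fst hz'
                    have : kp = k0 := by exact_mod_cast h1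
                    exact hkk0 this
                  · exact hnPF' (Or.inr ⟨_, hz', rfl⟩)
                · exact hnPF' (Or.inl ⟨p, List.mem_append_left _
                    (List.mem_filter.2 ⟨hp, by simpa using hplt⟩), hp1⟩)
              · have hz' : z ∈ ((k0 : Int), s[k0].1) :: restF := by
                  rw [← hfe]; exact mem_pvMerge.2 (Or.inl hz)
                rcases List.mem_cons.1 hz' with hz' | hz'
                · subst hz'
                  have hz1' : (k0 : Int) = (k : Int) := hz1
                  have : (k0 : Nat) = k := by exact_mod_cast hz1'
                  exact hkk0 this.symm
                · exact hnPF' (Or.inr ⟨z, hz', hz1⟩)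
      · intro v hv
        rcases (PySem.Dict.mem_keys_insert _ _ _ _).1 hv with rfl | hv
        · exact ⟨i, hi, by omega, rfl⟩
        · obtain ⟨k', hk', hk'i, he⟩ := hinv.keys_corr v hv
          exact ⟨k', hk', by omega, he⟩
      · intro v hv
        rcases (hVmem v).1 hv with hv | rfl
        · obtain ⟨k', hk', hk'i, he⟩ := hinv.vals_corr v hv
          exact ⟨k', hk', by omega, he⟩
        · exact ⟨k0, hk0, by omega, rfl⟩

-- bridges: the ports' enumerate-folds are the indexed loops
theorem pvBridgeA (s : List (String × Int × Int)) :
    ∀ (todo : List (String × Int × Int)) (i : Nat) plan,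
      (PySem.List.enumerate todo (i : Int)).foldl
        (fun reusePlan it =>
          match (PySem.List.slice s none (some it.1)).find? (pvPredA reusePlan it.2.2.1) with
          | some prev => reusePlan.insert it.2.1 prev.1
          | none => reusePlan) plan = pvLoopA s todo i plan := by
  intro todo
  induction todo with
  | nil => intro i plan; simp [PySem.List.enumerate_nil, pvLoopA]
  | cons t rest ih =>
      intro i plan
      rw [PySem.List.enumerate_cons]
      show (PySem.List.enumerate rest ((i : Int) + 1)).foldl _ _ = _
      have h1 : ((i : Int) + 1) = ((i + 1 : Nat) : Int) := by push_cast; ring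
      rw [h1, ih (i + 1)]
      simp only [pvLoopA, PySem.List.slice_to_natCast]

theorem pvBridgeB :
    ∀ (todo : List (String × Int × Int)) (i : Nat) st,
      (PySem.List.enumerate todo (i : Int)).foldl pvStepB st = pvLoopB todo i st := by
  intro todo
  induction todo with
  | nil => intro i st; simp [PySem.List.enumerate_nil, pvLoopB]
  | cons t rest ih =>
      intro i st
      rw [PySem.List.enumerate_cons]
      show (PySem.List.enumerate rest ((i : Int) + 1)).foldl _ _ = _
      have h1 : ((i : Int) + 1) = ((i + 1 : Nat) : Int) := by push_cast; ring
      rw [h1, ih (i + 1)]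
      rfl

-- ===== VERDICT (by name: the statement is the Claim_ definition above) =====
theorem pvInv0 (s : List (String × Int × Int)) : pvInv s 0 PySem.Dict.empty [] [] := by
  refine { pend_corr := ?_, free_corr := ?_, pend_sorted := List.Pairwise.nil,
           free_sorted := List.Pairwise.nil, disj := ?_, cover := ?_,
           keys_corr := ?_, vals_corr := ?_, keys_nodup := ?_ }
  · intro p hp; exact absurd hp (List.not_mem_nil)
  · intro q hq; exact absurd hq (List.not_mem_nil)
  · intro p hp; exact absurd hp (List.not_mem_nil)
  · intro k hk h0; exact absurd h0 (Nat.not_lt_zero k)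
  · intro v hv; exact absurd hv (by simp [PySem.Dict.keys, PySem.Dict.empty])
  · intro v hv; exact absurd hv (by simp [PySem.Dict.values, PySem.Dict.empty])
  · simp [PySem.Dict.keys, PySem.Dict.empty]

theorem plan_memory_reuse_py_spec : Claim_equal_plan_memory_reuse_py := by
  intro lifetimes _hdom hpre
  unfold Spec_plan_memory_reuse_py
  have hA : plan_memory_reuse_py lifetimes =
      (pvLoopA (PySem.List.sorted lifetimes (fun x => x.2.1) false)
        (PySem.List.sorted lifetimes (fun x => x.2.1) false) 0 PySem.Dict.empty).items := by
    unfold plan_memory_reuse_py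
    exact congrArg PySem.Dict.items
      (pvBridgeA (PySem.List.sorted lifetimes (fun x => x.2.1) false) _ 0 PySem.Dict.empty)
  have hB : plan_memory_reuse_py_alt lifetimes =
      (pvLoopB (PySem.List.sorted lifetimes (fun x => x.2.1) false) 0
        (PySem.Dict.empty, [], [])).1.items := by
    unfold plan_memory_reuse_py_alt
    exact congrArg (fun st => st.1.items) (pvBridgeB _ 0 (PySem.Dict.empty, [], []))
  have hnd : ((PySem.List.sorted lifetimes (fun x => x.2.1) false).map (·.1)).Nodup := by
    have hperm := (PySem.List.sorted_perm lifetimes (fun x => x.2.1) false).map (·.1)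
    exact hperm.nodup_iff.2 hpre
  have hmono : ∀ (p q : Nat) (hp : p < (PySem.List.sorted lifetimes (fun x => x.2.1) false).length)
      (hq : q < (PySem.List.sorted lifetimes (fun x => x.2.1) false).length), p ≤ q →
      (PySem.List.sorted lifetimes (fun x => x.2.1) false)[p].2.1 ≤
      (PySem.List.sorted lifetimes (fun x => x.2.1) false)[q].2.1 := by
    intro p q hp hq hpq
    exact PySem.List.key_sorted_getElem_mono lifetimes (fun x => x.2.1) hpq hq
  have hmain := pvMain (PySem.List.sorted lifetimes (fun x => x.2.1) false) hnd hmono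
    (PySem.List.sorted lifetimes (fun x => x.2.1) false) 0 PySem.Dict.empty [] []
    (by simp) (pvInv0 _)
  rw [hA, hB]
  exact congrArg (fun d => PySem.Dict.items d) hmain.symm
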